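-- pv_equiv track=rewrite | github.com/abachu2005/Leaf_Cutter | scripts/plot2.py | map_samples
-- ===== SOURCE A (Python) =====
-- def stem(name: str) -> str:
--     for suf in (".juncs.bed", ".juncs", ".bed", ".sorted.gz"):
--         if name.endswith(suf):
--             return name[: -len(suf)]
--     return name
--
-- def map_samples(count_cols, meta_samples):
--     exact = {c: c for c in count_cols if c in meta_samples}
--     remaining_c = [c for c in count_cols if c not in exact]
--     remaining_m = [m for m in meta_samples if m not in exact]
--     by_stem = {}
--     for m in remaining_m:
--         by_stem.setdefault(stem(m), []).append(m)
--     out = dict(exact)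
--     for c in remaining_c:
--         st = stem(c)
--         if st in by_stem and by_stem[st]:
--             out[c] = by_stem[st][0]
--     return out
-- ===== SOURCE B (Python) =====
-- def stem(name: str) -> str:
--     for suf in (".juncs.bed", ".juncs", ".bed", ".sorted.gz"):
--         if name.endswith(suf):
--             return name[: -len(suf)]
--     return name
--
-- def map_samples(count_cols, meta_samples):
--     # No match index at all: exact matches map to themselves, and every other
--     # count column is resolved by a direct first-match scan of meta_samples
--     # (same stem, not itself a count column).
--     cset = set(count_cols)
--     stems = [stem(x) for x in meta_samples]
--     out = {c: c for c in count_cols if c in meta_samples}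
--     for c in count_cols:
--         if c not in meta_samples:
--             sc = stem(c)
--             m = next((x for x, sx in zip(meta_samples, stems)
--                       if x not in cset and sx == sc), None)
--             if m is not None:
--                 out[c] = m
--     return out
-- ===== Notes on version B (the rewrite author's own statement) =====
-- stated objective: simpler
-- what changed: B drops A's whole match-index pipeline (exact dict, remaining_c/remaining_m lists, by_stem dict of lists): exact matches map to themselves, and each other count column is resolved independently by a direct first-match scan of meta_samples (same stem via a precomputed stems list, not itself a count column).
import Mathlib
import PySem

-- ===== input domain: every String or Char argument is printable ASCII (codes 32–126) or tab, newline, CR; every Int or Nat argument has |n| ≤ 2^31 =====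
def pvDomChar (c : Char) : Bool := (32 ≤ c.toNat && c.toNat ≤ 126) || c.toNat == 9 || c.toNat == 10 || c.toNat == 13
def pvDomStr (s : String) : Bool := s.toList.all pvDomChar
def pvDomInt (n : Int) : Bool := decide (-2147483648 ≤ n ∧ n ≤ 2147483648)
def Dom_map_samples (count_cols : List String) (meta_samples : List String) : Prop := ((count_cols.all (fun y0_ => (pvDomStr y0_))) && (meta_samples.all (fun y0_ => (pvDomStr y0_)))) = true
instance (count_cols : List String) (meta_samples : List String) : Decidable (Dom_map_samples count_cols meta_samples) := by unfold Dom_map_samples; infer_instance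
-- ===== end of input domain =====

-- B drops A's index structures (exact dict, remaining lists, by_stem dict of lists):
-- each non-exact count column is resolved by a direct first-match scan of meta_samples (objective: simpler, not faster).

-- ===== PORT A =====
-- helper stem: shared by both Pythons (same module helper)
def stemLoop (name : String) : List String → String
  | [] => name
  | suf :: rest =>
      if PySem.Str.endswith name suf then PySem.Str.slice name none (some (-(PySem.Str.len suf)))
      else stemLoop name rest

def stem (name : String) : String :=
  stemLoop name [".juncs.bed", ".juncs", ".bed", ".sorted.gz"]

def map_samples (count_cols : List String) (meta_samples : List String) : List (String × String) :=
  let exact := count_cols.foldl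
      (fun d c => if meta_samples.contains c then d.insert c c else d)
      (PySem.Dict.empty : PySem.Dict String String)
  let remaining_c := count_cols.filter (fun c => !exact.contains c)
  let remaining_m := meta_samples.filter (fun m => !exact.contains m)
  let by_stem := remaining_m.foldl
      (fun d m => d.modify (stem m) [] (· ++ [m]))
      (PySem.Dict.empty : PySem.Dict String (List String))
  let out := remaining_c.foldl
      (fun o c =>
        match by_stem.get? (stem c) with
        | some (x :: _) => o.insert c x
        | _ => o)
      exact
  out.items

-- ===== PORT B =====
def map_samples_alt (count_cols : List String) (meta_samples : List String) : List (String × String) :=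
  let cset := PySem.Set.ofList count_cols
  let stems := meta_samples.map stem
  let out0 := count_cols.foldl
      (fun d c => if meta_samples.contains c then d.insert c c else d)
      (PySem.Dict.empty : PySem.Dict String String)
  let out := count_cols.foldl
      (fun o c =>
        if !meta_samples.contains c then
          let sc := stem c
          match (meta_samples.zip stems).find? (fun p => !cset.contains p.1 && p.2 == sc) with
          | some p => o.insert c p.1
          | none => o
        else o)
      out0
  out.items

-- ===== PRECONDITION & SPEC =====
def Spec_map_samples (count_cols : List String) (meta_samples : List String) (out : List (String × String)) : Prop := out = map_samples_alt count_cols meta_samples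
instance (count_cols : List String) (meta_samples : List String) (out : List (String × String)) : Decidable (Spec_map_samples count_cols meta_samples out) := by unfold Spec_map_samples; infer_instance

-- ===== CLAIM (what is proved, stated in full; the proofs are below) =====
def Claim_equal_map_samples : Prop := ∀ (count_cols : List String) (meta_samples : List String), Dom_map_samples count_cols meta_samples → Spec_map_samples count_cols meta_samples (map_samples count_cols meta_samples)

-- ===== LEMMAS AND PROOFS =====

-- A's `exact` dict contains x iff x is a count column that is also a meta sample.
theorem exact_contains (count_cols meta_samples : List String)
    (d : PySem.Dict String String) (x : String) :
    (count_cols.foldl (fun d c => if meta_samples.contains c then d.insert c c else d) d).contains x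
      = (d.contains x || (count_cols.contains x && meta_samples.contains x)) := by
  induction count_cols generalizing d with
  | nil => simp
  | cons c cs ih =>
      simp only [List.foldl_cons, List.contains_cons]
      by_cases h : meta_samples.contains c
      · rw [if_pos h, ih, PySem.Dict.contains_insert]
        by_cases hx : x = c <;>
          cases hd : d.contains x <;> cases hc : cs.contains x <;>
            simp_all [beq_iff_eq]
      · rw [if_neg h, ih]
        by_cases hx : x = c <;>
          cases hd : d.contains x <;> cases hc : cs.contains x <;>
            simp_all [beq_iff_eq]

-- Python's next(generator, None) is the head of the filtered list.
theorem find?_eq_head_filter {α : Type} (p : α → Bool) (l : List α) :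
    l.find? p = (l.filter p).head? := by
  induction l with
  | nil => rfl
  | cons a t ih =>
      by_cases h : p a = true
      · simp [List.find?_cons, List.filter_cons, h]
      · simp only [List.find?_cons, List.filter_cons, h, Bool.false_eq_true, if_false]
        simpa using ih

-- the by_stem lookup, matched into an option head, is the first-match scan of remaining_m
theorem byStem_lookup (remaining_m : List String) (st : String) :
    (match (remaining_m.foldl (fun d m => d.modify (stem m) [] (· ++ [m]))
        (PySem.Dict.empty : PySem.Dict String (List String))).get? st with
      | some (x :: _) => some x
      | _ => none)
      = (remaining_m.filter (fun m => stem m == st)).head? := by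
  have key := PySem.Dict.getD_foldl_modify_append
      (l := remaining_m.map (fun m => (stem m, m)))
      (d := (PySem.Dict.empty : PySem.Dict String (List String))) (c := st)
  rw [List.foldl_map] at key
  simp only [List.filter_map, Function.comp_def, List.map_map, PySem.Dict.getD_empty,
    List.nil_append] at key
  have hgetD : (remaining_m.foldl (fun d m => d.modify (stem m) [] (· ++ [m]))
      (PySem.Dict.empty : PySem.Dict String (List String))).getD st []
      = remaining_m.filter (fun m => stem m == st) := by
    rw [key]; simp
  rw [PySem.Dict.getD_eq_get?_getD] at hgetD
  cases hg : (remaining_m.foldl (fun d m => d.modify (stem m) [] (· ++ [m]))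
      (PySem.Dict.empty : PySem.Dict String (List String))).get? st with
  | none =>
      rw [hg] at hgetD
      simp only [Option.getD_none] at hgetD
      rw [← hgetD]
      rfl
  | some l =>
      rw [hg] at hgetD
      simp only [Option.getD_some] at hgetD
      cases l with
      | nil => rw [← hgetD]; rfl
      | cons x xs => rw [← hgetD]; rfl

-- the zip-with-cached-stems scan is the plain first-match scan
theorem find_zip_stem (q : String → Bool) (l : List String) (sc : String) :
    (l.zip (l.map stem)).find? (fun p => q p.1 && p.2 == sc)
      = (l.find? (fun x => q x && stem x == sc)).map (fun x => (x, stem x)) := by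
  have h : l.zip (l.map stem) = l.map (fun x => (x, stem x)) := by
    conv_lhs => rw [show l.zip (l.map stem) = (l.map id).zip (l.map stem) by rw [List.map_id]]
    rw [List.zip_map']
    rfl
  rw [h, List.find?_map]
  rfl

theorem set_contains_ofList (xs : List String) (y : String) :
    PySem.Set.contains (PySem.Set.ofList xs) y = xs.contains y := by
  simp [PySem.Set.contains, PySem.Set.mem_ofList]

-- ===== VERDICT (by name: the statement is the Claim_ definition above) =====
theorem map_samples_spec : Claim_equal_map_samples := by
  intro count_cols meta_samples _
  unfold Spec_map_samples map_samples map_samples_alt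
  simp only [set_contains_ofList]
  have hex : ∀ x, (count_cols.foldl
      (fun d c => if meta_samples.contains c then d.insert c c else d)
      (PySem.Dict.empty : PySem.Dict String String)).contains x
      = (count_cols.contains x && meta_samples.contains x) := by
    intro x; rw [exact_contains]; simp
  have hrc : count_cols.filter (fun c => !(count_cols.foldl
        (fun d c => if meta_samples.contains c then d.insert c c else d)
        (PySem.Dict.empty : PySem.Dict String String)).contains c)
      = count_cols.filter (fun c => !meta_samples.contains c) := by
    apply List.filter_congr
    intro c hc
    rw [hex]
    simp [hc]
  have hrm : meta_samples.filter (fun m => !(count_cols.foldl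
        (fun d c => if meta_samples.contains c then d.insert c c else d)
        (PySem.Dict.empty : PySem.Dict String String)).contains m)
      = meta_samples.filter (fun m => !count_cols.contains m) := by
    apply List.filter_congr
    intro m hm
    rw [hex]
    simp [hm]
  simp only [hrc, hrm]
  -- B's guarded loop over count_cols is A's loop over remaining_c
  have hguard : ∀ (l : List String) (init : PySem.Dict String String),
      l.foldl (fun o c =>
          if !meta_samples.contains c then
            match (meta_samples.zip (meta_samples.map stem)).find?
                (fun p => !count_cols.contains p.1 && p.2 == stem c) with
            | some p => o.insert c p.1
            | none => o
          else o) init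
        = (l.filter (fun c => !meta_samples.contains c)).foldl (fun o c =>
            match (meta_samples.zip (meta_samples.map stem)).find?
                (fun p => !count_cols.contains p.1 && p.2 == stem c) with
            | some p => o.insert c p.1
            | none => o) init := by
    intro l
    induction l with
    | nil => intro init; rfl
    | cons c cs ih =>
        intro init
        simp only [List.foldl_cons, List.filter_cons]
        by_cases h : meta_samples.contains c
        · simp only [h, Bool.not_true, Bool.false_eq_true, if_false]
          exact ih init
        · rw [Bool.eq_false_iff.mpr h]
          simp only [Bool.not_false, if_true, List.foldl_cons]
          exact ih _
  rw [hguard]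
  -- the two per-element steps coincide
  have hstep : (fun (o : PySem.Dict String String) (c : String) =>
      match ((meta_samples.filter (fun m => !count_cols.contains m)).foldl
          (fun d m => d.modify (stem m) [] (· ++ [m]))
          (PySem.Dict.empty : PySem.Dict String (List String))).get? (stem c) with
      | some (x :: _) => o.insert c x
      | _ => o)
      = (fun (o : PySem.Dict String String) (c : String) =>
      match (meta_samples.zip (meta_samples.map stem)).find?
          (fun p => !count_cols.contains p.1 && p.2 == stem c) with
      | some p => o.insert c p.1
      | none => o) := by
    funext o c
    rw [find_zip_stem (fun x => !count_cols.contains x) meta_samples (stem c)]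
    rw [find?_eq_head_filter]
    have hcomm : meta_samples.filter (fun x => !count_cols.contains x && stem x == stem c)
        = (meta_samples.filter (fun m => !count_cols.contains m)).filter
            (fun m => stem m == stem c) := by
      rw [List.filter_filter]
      exact List.filter_congr (fun a _ => by rw [Bool.and_comm])
    rw [hcomm, ← byStem_lookup]
    cases ((meta_samples.filter (fun m => !count_cols.contains m)).foldl
        (fun d m => d.modify (stem m) [] (· ++ [m]))
        (PySem.Dict.empty : PySem.Dict String (List String))).get? (stem c) with
    | none => rfl
    | some l => cases l <;> rfl
  rw [hstep]
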